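-- pv_equiv track=rewrite | github.com/TimKettenacker/nlp-snippets-collection | pos.py | pair_counts
-- ===== SOURCE A (Python) =====
-- from collections import Counter, defaultdict
--
-- def pair_counts(sequences_A, sequences_B):
--     """Return a dictionary keyed to each unique value in the first sequence list
--     that counts the number of occurrences of the corresponding value from the
--     second sequences list.
--
--     For example, if sequences_A is tags and sequences_B is the corresponding
--     words, then if 1244 sequences contain the word "time" tagged as a NOUN, then
--     you should return a dictionary such that pair_counts[NOUN][time] == 1244
--     """
--     assert len(sequences_A) == len(sequences_B), \
--         "length of input parameters should be the same"
--     d = defaultdict(Counter)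
--     for i in range(len(sequences_A)):
--         for tag, word in zip(sequences_A[i], sequences_B[i]):
--             d[tag][word] += 1
--     return d
--     raise NotImplementedError
-- ===== SOURCE B (Python) =====
-- from collections import Counter, defaultdict
--
-- def pair_counts(sequences_A, sequences_B):
--     """Return a dictionary keyed to each unique value in the first sequence list
--     that counts the number of occurrences of the corresponding value from the
--     second sequences list."""
--     assert len(sequences_A) == len(sequences_B), \
--         "length of input parameters should be the same"
--     pairs = [(t, w) for ts, ws in zip(sequences_A, sequences_B)
--              for t, w in zip(ts, ws)]
--     d = defaultdict(Counter)
--     for tag in dict.fromkeys(t for t, _ in pairs):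
--         d[tag] = Counter(w for t, w in pairs if t == tag)
--     return d
-- ===== Notes on version B (the rewrite author's own statement) =====
-- stated objective: alternative
-- what changed: A counts incrementally into a nested defaultdict(Counter) while scanning by index; B flattens the zipped sequences into one pair list, takes the distinct tags in first-occurrence order, and builds each tag's Counter in a separate per-tag pass over the pair list (group-by-key instead of single-pass increment).
import Mathlib
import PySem

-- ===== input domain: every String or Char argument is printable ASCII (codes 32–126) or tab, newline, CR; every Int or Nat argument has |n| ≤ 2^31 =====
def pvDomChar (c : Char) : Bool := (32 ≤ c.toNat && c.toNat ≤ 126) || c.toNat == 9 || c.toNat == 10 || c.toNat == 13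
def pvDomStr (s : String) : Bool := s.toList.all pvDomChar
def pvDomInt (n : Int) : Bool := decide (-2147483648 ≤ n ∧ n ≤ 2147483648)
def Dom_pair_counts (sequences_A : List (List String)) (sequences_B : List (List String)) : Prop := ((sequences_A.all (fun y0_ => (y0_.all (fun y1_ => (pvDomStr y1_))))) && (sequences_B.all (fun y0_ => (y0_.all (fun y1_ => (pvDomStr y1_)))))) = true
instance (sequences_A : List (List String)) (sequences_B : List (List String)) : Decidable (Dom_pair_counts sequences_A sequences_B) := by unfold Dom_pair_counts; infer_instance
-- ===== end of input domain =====

-- B replaces A's single-pass incremental counting into a nested defaultdict(Counter) by a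
-- group-by decomposition: flatten to one (tag, word) pair list, dedup the tags in order, and
-- count each tag's words in its own per-tag pass (objective: alternative; O(n*T), not faster).

-- ===== PORT A =====
-- A's loop: for i in range(len(sequences_A)): for tag, word in zip(A[i], B[i]): d[tag][word] += 1
def pair_counts (sequences_A : List (List String)) (sequences_B : List (List String)) : List (String × List (String × Int)) :=
  let d := (PySem.List.pyRange 0 (PySem.List.len sequences_A)).foldl
    (fun d i =>
      ((PySem.List.pyGetD sequences_A i []).zip (PySem.List.pyGetD sequences_B i [])).foldl
        (fun d p => d.modify p.1 PySem.Dict.empty (fun c => c.modify p.2 0 (· + 1))) d)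
    PySem.Dict.empty
  d.items.map (fun q => (q.1, q.2.items))

-- ===== PORT B =====
-- B: pairs = flattened zip; for tag in dict.fromkeys(tags): d[tag] = Counter(w for t, w in pairs if t == tag)
def pair_counts_alt (sequences_A : List (List String)) (sequences_B : List (List String)) : List (String × List (String × Int)) :=
  let pairs := (sequences_A.zip sequences_B).flatMap (fun q => q.1.zip q.2)
  let d := (PySem.List.dedup (pairs.map (·.1))).foldl
    (fun d tag =>
      d.insert tag (PySem.Dict.counter ((pairs.filter (fun p => p.1 == tag)).map (·.2))))
    PySem.Dict.empty
  d.items.map (fun q => (q.1, q.2.items))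

-- ===== PRECONDITION & SPEC =====
-- A (and B) assert len(sequences_A) == len(sequences_B); Pre_ excludes exactly the AssertionError inputs.
def Pre_pair_counts (sequences_A : List (List String)) (sequences_B : List (List String)) : Prop :=
  sequences_A.length = sequences_B.length
instance (sequences_A : List (List String)) (sequences_B : List (List String)) : Decidable (Pre_pair_counts sequences_A sequences_B) := by unfold Pre_pair_counts; infer_instance
def pvWitness_pair_counts : List (List String) × List (List String) := ([["NOUN", "VERB"], ["NOUN"]], [["time", "flies"], ["time"]])

def Spec_pair_counts (sequences_A : List (List String)) (sequences_B : List (List String)) (out : List (String × List (String × Int))) : Prop := out = pair_counts_alt sequences_A sequences_B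
instance (sequences_A : List (List String)) (sequences_B : List (List String)) (out : List (String × List (String × Int))) : Decidable (Spec_pair_counts sequences_A sequences_B out) := by unfold Spec_pair_counts; infer_instance

-- ===== CLAIM (what is proved, stated in full; the proofs are below) =====
def Claim_equal_pair_counts : Prop := ∀ (sequences_A : List (List String)) (sequences_B : List (List String)), Dom_pair_counts sequences_A sequences_B → Pre_pair_counts sequences_A sequences_B → Spec_pair_counts sequences_A sequences_B (pair_counts sequences_A sequences_B)

-- ===== LEMMAS AND PROOFS =====

-- an index loop over two equal-length lists is a fold over their zip
theorem pc_foldl_pyRange_two {α σ : Type} (xs ys : List α) (dflt : α)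
    (h : xs.length = ys.length) (f : σ → α × α → σ) (s : σ) :
    (PySem.List.pyRange 0 (PySem.List.len xs)).foldl
      (fun a i => f a (PySem.List.pyGetD xs i dflt, PySem.List.pyGetD ys i dflt)) s
      = (xs.zip ys).foldl f s := by
  have hlen : PySem.List.len ys = PySem.List.len xs := by
    simp [PySem.List.len, h]
  conv_rhs => rw [← PySem.List.map_pyGetD_pyRange_zero xs dflt,
    ← PySem.List.map_pyGetD_pyRange_zero ys dflt, hlen, List.zip_map', List.foldl_map]

-- the value at key t after a modify-loop keyed by `key` is the fold of the matching elements
theorem pc_getD_foldl_modifyk {β ν : Type} (l : List β) (key : β → String) (d0 : ν)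
    (f : β → ν → ν) (d : PySem.Dict String ν) (t : String) :
    (l.foldl (fun d x => d.modify (key x) d0 (f x)) d).getD t d0
      = (l.filter (fun x => key x == t)).foldl (fun v x => f x v) (d.getD t d0) := by
  induction l generalizing d with
  | nil => rfl
  | cons x l ih =>
    simp only [List.foldl_cons, List.filter_cons]
    rw [ih, PySem.Dict.getD_modify]
    by_cases hx : key x = t
    · simp [hx]
    · simp [hx, Ne.symm hx]

-- ===== VERDICT (by name: the statement is the Claim_ definition above) =====
theorem pair_counts_spec : Claim_equal_pair_counts := by
  intro A B _ hpre
  unfold Spec_pair_counts pair_counts pair_counts_alt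
  simp only []
  -- A's index loop is the pair-list fold
  have hA : (List.foldl
      (fun (d : PySem.Dict String (PySem.Dict String Int)) i =>
        List.foldl (fun d p => d.modify p.1 PySem.Dict.empty (fun c => c.modify p.2 0 (· + 1))) d
          ((PySem.List.pyGetD A i []).zip (PySem.List.pyGetD B i [])))
      PySem.Dict.empty (PySem.List.pyRange 0 (PySem.List.len A)))
      = List.foldl (fun d p => d.modify p.1 PySem.Dict.empty (fun c => c.modify p.2 0 (· + 1)))
        PySem.Dict.empty ((A.zip B).flatMap (fun q => q.1.zip q.2)) := by
    calc _ = (A.zip B).foldl (fun (d : PySem.Dict String (PySem.Dict String Int)) q => (q.1.zip q.2).foldl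
            (fun d p => d.modify p.1 PySem.Dict.empty (fun c => c.modify p.2 0 (· + 1))) d)
            PySem.Dict.empty :=
          pc_foldl_pyRange_two A B [] hpre _ _
      _ = _ := List.foldl_flatMap.symm
  refine Eq.trans (congrArg (fun d : PySem.Dict String (PySem.Dict String Int) =>
    d.items.map (fun q => (q.1, q.2.items))) hA) ?_
  beta_reduce
  set pairs := (A.zip B).flatMap (fun q => q.1.zip q.2) with hpairs
  set dA := List.foldl (fun (d : PySem.Dict String (PySem.Dict String Int)) p =>
      d.modify p.1 PySem.Dict.empty (fun c => c.modify p.2 0 (· + 1))) PySem.Dict.empty pairs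
    with hdA
  -- A's keys, in order, are the deduped tags
  have hkA : dA.keys = PySem.Set.ofList (pairs.map (fun p => p.1)) := by
    have := PySem.Dict.keys_foldl_modify_key pairs (fun p => p.1)
      (PySem.Dict.empty : PySem.Dict String Int)
      (fun _ p c => c.modify p.2 0 (· + 1)) PySem.Dict.empty
    simpa [PySem.Set.update_nil_left, hdA] using this
  have hnA : dA.keys.Nodup :=
    PySem.Dict.nodup_keys_foldl_modify_key pairs (fun p => p.1)
      (PySem.Dict.empty : PySem.Dict String Int)
      (fun _ p c => c.modify p.2 0 (· + 1)) PySem.Dict.empty (by simp)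
  -- A's value at tag t is the Counter of the words carrying tag t
  have hval : ∀ t : String, dA.getD t PySem.Dict.empty
      = PySem.Dict.counter ((pairs.filter (fun p => p.1 == t)).map (·.2)) := by
    intro t
    rw [hdA, pc_getD_foldl_modifyk pairs (fun p => p.1) PySem.Dict.empty
      (fun p c => c.modify p.2 0 (· + 1)) PySem.Dict.empty t,
      PySem.Dict.getD_empty, PySem.Dict.counter_eq_foldl, List.foldl_map]
  -- B's insert loop runs over fresh distinct keys, so its items are just the mapped tag list
  have hB : (((PySem.List.dedup (pairs.map (·.1))).foldl
      (fun d tag =>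
        d.insert tag (PySem.Dict.counter ((pairs.filter (fun p => p.1 == tag)).map (·.2))))
      PySem.Dict.empty) : PySem.Dict String (PySem.Dict String Int)).items
      = (PySem.List.dedup (pairs.map (·.1))).map
          (fun t => (t, PySem.Dict.counter ((pairs.filter (fun p => p.1 == t)).map (·.2)))) := by
    have := PySem.Dict.items_foldl_insert_fresh (PySem.List.dedup (pairs.map (·.1)))
      (fun t : String => t)
      (fun t => PySem.Dict.counter ((pairs.filter (fun p => p.1 == t)).map (·.2)))
      (PySem.Dict.empty : PySem.Dict String (PySem.Dict String Int))
      (fun a _ => PySem.Dict.contains_empty a)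
      (by simp [PySem.List.nodup_dedup])
    simpa using this
  rw [hB, PySem.Dict.items_eq_map_keys dA hnA (PySem.Dict.empty : PySem.Dict String Int),
    hkA, ← PySem.List.dedup_eq_ofList, List.map_map, List.map_map]
  apply List.map_congr_left
  intro t _
  simp only [Function.comp]
  rw [hval t]
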